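-- pv_equiv track=rewrite | github.com/paulvik/Deep-Learning-Udacity-Autonomous-Car | data_preprocessing.py | split_data_set_by_camera
-- ===== SOURCE A (Python) =====
-- def split_data_set_by_camera(image_list):
--
--     center_camera_temp = []
--     left_camera_temp = []
--     right_camera_temp = []
--
--     for image in range(len(image_list)):
--
--         image_split = image_list[image].split("_")
--
--         if image_split[0] == "center":
--             center_camera_temp.append(image_list[image])
--
--         elif image_split[0] == "left":
--             left_camera_temp.append(image_list[image])
--
--         elif image_split[0] == "right":
--             right_camera_temp.append(image_list[image])
--
--     return center_camera_temp, left_camera_temp, right_camera_temp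
-- ===== SOURCE B (Python) =====
-- def split_data_set_by_camera(image_list):
--     center = [img for img in image_list if img.split("_")[0] == "center"]
--     left = [img for img in image_list if img.split("_")[0] == "left"]
--     right = [img for img in image_list if img.split("_")[0] == "right"]
--     return center, left, right
-- ===== Notes on version B (the rewrite author's own statement) =====
-- stated objective: idiomatic
-- what changed: Replaced the single index loop with an if/elif cascade and three mutable accumulators by three independent filtered list comprehensions, one full scan per camera prefix.
import Mathlib
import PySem

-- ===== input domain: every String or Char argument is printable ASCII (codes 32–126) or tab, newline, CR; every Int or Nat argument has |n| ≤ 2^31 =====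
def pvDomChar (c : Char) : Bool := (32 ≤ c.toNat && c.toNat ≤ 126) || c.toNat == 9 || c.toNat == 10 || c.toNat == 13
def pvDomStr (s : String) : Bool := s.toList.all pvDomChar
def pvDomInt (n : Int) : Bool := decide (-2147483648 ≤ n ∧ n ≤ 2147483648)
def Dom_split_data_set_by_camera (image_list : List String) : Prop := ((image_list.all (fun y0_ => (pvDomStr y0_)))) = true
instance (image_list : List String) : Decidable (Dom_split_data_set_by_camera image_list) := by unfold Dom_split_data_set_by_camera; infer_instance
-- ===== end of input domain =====

-- B replaces A's index loop with if/elif cascade by three independent filtered comprehensions, one per camera (idiomatic; same cost).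
-- ===== PORT A =====
def split_data_set_by_camera (image_list : List String) : List String × List String × List String :=
  -- center_camera_temp = [] ; left_camera_temp = [] ; right_camera_temp = []
  -- for image in range(len(image_list)): … (index loop; image_list[image] is always in range)
  let res := (PySem.List.pyRange 0 (PySem.List.len image_list) 1).foldl
    (fun (acc : List String × List String × List String) image =>
      let img := PySem.List.pyGetD image_list image ""
      let image_split := (PySem.Str.split? img "_").getD []
      if PySem.List.pyGetD image_split 0 "" = "center" then
        (acc.1 ++ [img], acc.2.1, acc.2.2)
      else if PySem.List.pyGetD image_split 0 "" = "left" then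
        (acc.1, acc.2.1 ++ [img], acc.2.2)
      else if PySem.List.pyGetD image_split 0 "" = "right" then
        (acc.1, acc.2.1, acc.2.2 ++ [img])
      else acc)
    ([], [], [])
  res

-- ===== PORT B =====
-- img.split("_")[0]
def pvPrefix (img : String) : String :=
  PySem.List.pyGetD ((PySem.Str.split? img "_").getD []) 0 ""

def split_data_set_by_camera_alt (image_list : List String) : List String × List String × List String :=
  (image_list.filter (fun img => pvPrefix img = "center"),
   image_list.filter (fun img => pvPrefix img = "left"),
   image_list.filter (fun img => pvPrefix img = "right"))

-- ===== PRECONDITION & SPEC =====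
def Spec_split_data_set_by_camera (image_list : List String) (out : List String × List String × List String) : Prop := out = split_data_set_by_camera_alt image_list
instance (image_list : List String) (out : List String × List String × List String) : Decidable (Spec_split_data_set_by_camera image_list out) := by unfold Spec_split_data_set_by_camera; infer_instance

-- ===== CLAIM (what is proved, stated in full; the proofs are below) =====
def Claim_equal_split_data_set_by_camera : Prop := ∀ (image_list : List String), Dom_split_data_set_by_camera image_list → Spec_split_data_set_by_camera image_list (split_data_set_by_camera image_list)

-- ===== LEMMAS AND PROOFS =====

-- ===== VERDICT (by name: the statement is the Claim_ definition above) =====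
def pvStep (acc : List String × List String × List String) (img : String) :
    List String × List String × List String :=
  if pvPrefix img = "center" then (acc.1 ++ [img], acc.2.1, acc.2.2)
  else if pvPrefix img = "left" then (acc.1, acc.2.1 ++ [img], acc.2.2)
  else if pvPrefix img = "right" then (acc.1, acc.2.1, acc.2.2 ++ [img])
  else acc

lemma pv_loop (xs : List String) (c l r : List String) :
    xs.foldl pvStep (c, l, r)
    = (c ++ xs.filter (fun img => pvPrefix img = "center"),
       l ++ xs.filter (fun img => pvPrefix img = "left"),
       r ++ xs.filter (fun img => pvPrefix img = "right")) := by
  induction xs generalizing c l r with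
  | nil => simp
  | cons x xs ih =>
    by_cases hc : pvPrefix x = "center"
    · simp [List.foldl_cons, pvStep, hc, ih]
    · by_cases hl : pvPrefix x = "left"
      · simp [List.foldl_cons, pvStep, hl, ih]
      · by_cases hr : pvPrefix x = "right"
        · simp [List.foldl_cons, pvStep, hr, ih]
        · simp [List.foldl_cons, pvStep, hc, hl, hr, ih]

theorem split_data_set_by_camera_spec : Claim_equal_split_data_set_by_camera := by
  intro image_list _
  unfold Spec_split_data_set_by_camera
  calc split_data_set_by_camera image_list
      = (PySem.List.pyRange 0 (PySem.List.len image_list) 1).foldl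
          (fun acc j => pvStep acc (PySem.List.pyGetD image_list j "")) ([], [], []) := rfl
    _ = image_list.foldl pvStep ([], [], []) :=
          PySem.List.foldl_pyRange_zero_pyGetD image_list "" pvStep ([], [], [])
    _ = split_data_set_by_camera_alt image_list := by
          rw [pv_loop]; rfl
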